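-- pv_equiv track=rewrite | github.com/agatha-duzan/autoformalization_with_hypothesis | src/autoformalization_typechecking/utils.py | generate_n_samples_sequence
-- ===== SOURCE A (Python) =====
-- def generate_n_samples_sequence(max_n: int) -> list[int]:
--     """Generate the sequence 1, 2, 5, 10, 20, 50, 100, 200, 500, 1000, ... until max_n."""
--     repeating_seq = [1, 2, 5]
--     sequence = []
--     i = 1
--     while i <= max_n:
--         sequence.extend([i * r for r in repeating_seq if i * r <= max_n])
--         i *= 10
--     return sequence
-- ===== SOURCE B (Python) =====
-- def generate_n_samples_sequence(max_n: int) -> list[int]: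
--     """Generate the sequence 1, 2, 5, 10, 20, 50, 100, 200, 500, 1000, ... until max_n.
--
--     Divide-and-conquer on magnitude: the sequence is self-similar, S(n) is the
--     single-digit values {1,2,5} that fit, followed by 10 times S(n // 10).
--     """
--     if max_n < 1:
--         return []
--     head = [m for m in (1, 2, 5) if m <= max_n]
--     return head + [10 * x for x in generate_n_samples_sequence(max_n // 10)]
-- ===== Notes on version B (the rewrite author's own statement) =====
-- stated objective: alternative
-- what changed: Replaced A's iterative walk over growing powers of 10 with an inner filtering comprehension by a divide-and-conquer recursion exploiting the sequence's self-similarity: S(n) = ({1,2,5} truncated to n) ++ 10*S(n//10).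
import Mathlib
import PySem

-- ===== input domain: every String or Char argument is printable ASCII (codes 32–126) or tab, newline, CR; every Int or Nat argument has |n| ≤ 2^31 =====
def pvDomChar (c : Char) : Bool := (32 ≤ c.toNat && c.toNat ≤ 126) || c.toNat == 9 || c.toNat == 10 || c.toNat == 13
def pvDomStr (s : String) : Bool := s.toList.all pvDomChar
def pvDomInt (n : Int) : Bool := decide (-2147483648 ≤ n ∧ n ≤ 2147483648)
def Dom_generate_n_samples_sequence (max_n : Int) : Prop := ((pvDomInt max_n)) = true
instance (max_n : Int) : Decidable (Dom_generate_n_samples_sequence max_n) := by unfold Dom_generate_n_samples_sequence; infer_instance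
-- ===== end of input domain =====

-- B replaces A's iterative powers-of-10 walk with a filtering comprehension by a
-- divide-and-conquer recursion on magnitude: S(n) = ({1,2,5} ∩ [1,n]) ++ 10·S(n//10) (objective: alternative).


-- ===== PORT A =====
-- `while i <= max_n: sequence.extend([i*r for r in [1,2,5] if i*r <= max_n]); i *= 10`
-- as structural recursion on i; the subtype carries the loop invariant 1 ≤ i for termination.
def pvLoopA (max_n : Int) (i : {i : Int // 1 ≤ i}) : List Int :=
  if h : i.1 ≤ max_n then
    (([1, 2, 5].filter (fun r => i.1 * r ≤ max_n)).map (fun r => i.1 * r))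
      ++ pvLoopA max_n ⟨i.1 * 10, by have := i.2; omega⟩
  else []
termination_by (max_n + 1 - i.1).toNat
decreasing_by
  have := i.2; omega

def generate_n_samples_sequence (max_n : Int) : List Int :=
  pvLoopA max_n ⟨1, le_refl 1⟩

-- ===== PORT B =====
-- Source B's divide-and-conquer recursion: if max_n < 1 then [] else the single-digit
-- values that fit, followed by 10 times the recursive solution for max_n // 10.
def generate_n_samples_sequence_alt (max_n : Int) : List Int :=
  if h : max_n < 1 then []
  else
    ([1, 2, 5].filter (fun m => m ≤ max_n))
      ++ (generate_n_samples_sequence_alt (PySem.Int.floordiv max_n 10)).map (fun x => 10 * x)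
termination_by max_n.toNat
decreasing_by
  rw [PySem.Int.floordiv_eq_ediv_of_pos (by omega)]; omega

-- ===== PRECONDITION & SPEC =====
def Spec_generate_n_samples_sequence (max_n : Int) (out : List Int) : Prop := out = generate_n_samples_sequence_alt max_n
instance (max_n : Int) (out : List Int) : Decidable (Spec_generate_n_samples_sequence max_n out) := by unfold Spec_generate_n_samples_sequence; infer_instance

-- ===== CLAIM (what is proved, stated in full; the proofs are below) =====
def Claim_equal_generate_n_samples_sequence : Prop := ∀ (max_n : Int), Dom_generate_n_samples_sequence max_n → Spec_generate_n_samples_sequence max_n (generate_n_samples_sequence max_n)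

-- ===== LEMMAS AND PROOFS =====

-- one unfolding of A's loop
theorem pvLoopA_eq (n d : Int) (hd : 1 ≤ d) :
    pvLoopA n ⟨d, hd⟩ =
      if d ≤ n then
        (([1, 2, 5].filter (fun r => d * r ≤ n)).map (fun r => d * r))
          ++ pvLoopA n ⟨d * 10, by omega⟩
      else [] := by
  rw [pvLoopA]; rfl

theorem pvLoopA_nil (n d : Int) (hd : 1 ≤ d) (h : ¬ d ≤ n) :
    pvLoopA n ⟨d, hd⟩ = [] := by
  rw [pvLoopA]; simp [h]

-- A's loop from i = 10*d over bound n equals 10 times the loop from i = d over bound n/10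
theorem pvLoopA_scale (g : Nat) :
    ∀ (n d : Int) (hd : 1 ≤ d), (n + 1 - d * 10).toNat ≤ g →
      pvLoopA n ⟨d * 10, by omega⟩ = (pvLoopA (n / 10) ⟨d, hd⟩).map (fun x => 10 * x) := by
  induction g with
  | zero =>
    intro n d hd hle
    rw [pvLoopA_nil n (d * 10) (by omega) (by omega),
        pvLoopA_nil (n / 10) d hd (by omega)]
    simp
  | succ g ih =>
    intro n d hd hle
    rw [pvLoopA_eq n (d * 10), pvLoopA_eq (n / 10) d]
    by_cases h1 : d * 10 ≤ n
    · have hq1 : d ≤ n / 10 := by omega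
      have hrec := ih n (d * 10) (by omega) (by omega)
      have b1 : decide (d * 10 * 1 ≤ n) = true := by simp; omega
      have q1 : decide (d * 1 ≤ n / 10) = true := by simp; omega
      by_cases h2 : d * 10 * 2 ≤ n
      · have b2 : decide (d * 10 * 2 ≤ n) = true := by simp [h2]
        have q2 : decide (d * 2 ≤ n / 10) = true := by simp; omega
        by_cases h5 : d * 10 * 5 ≤ n
        · have b5 : decide (d * 10 * 5 ≤ n) = true := by simp [h5]
          have q5 : decide (d * 5 ≤ n / 10) = true := by simp; omega
          simp only [List.filter, List.map, b1, b2, b5, q1, q2, q5, h1, hq1,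
            if_true, List.map_append, List.map_cons, hrec]
          simp [mul_comm, mul_left_comm, mul_assoc]
        · have b5 : decide (d * 10 * 5 ≤ n) = false := by simp [h5]
          have q5 : decide (d * 5 ≤ n / 10) = false := by simp; omega
          rw [pvLoopA_nil n (d * 10 * 10) (by omega) (by omega),
              pvLoopA_nil (n / 10) (d * 10) (by omega) (by omega)]
          simp only [List.filter, List.map, b1, b2, b5, q1, q2, q5, h1, hq1,
            if_true, List.map_append, List.map_cons]
          simp [mul_comm, mul_left_comm, mul_assoc]
      · have b2 : decide (d * 10 * 2 ≤ n) = false := by simp [h2]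
        have q2 : decide (d * 2 ≤ n / 10) = false := by simp; omega
        have b5 : decide (d * 10 * 5 ≤ n) = false := by simp; omega
        have q5 : decide (d * 5 ≤ n / 10) = false := by simp; omega
        rw [pvLoopA_nil n (d * 10 * 10) (by omega) (by omega),
            pvLoopA_nil (n / 10) (d * 10) (by omega) (by omega)]
        simp only [List.filter, List.map, b1, b2, b5, q1, q2, q5, h1, hq1,
          if_true, List.map_append, List.map_cons]
        simp [mul_comm, mul_left_comm]
    · have hq1 : ¬ d ≤ n / 10 := by omega
      simp [h1, hq1]

-- A's whole loop equals B's recursion, by strong induction on max_n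
theorem pvA_eq_alt (g : Nat) :
    ∀ (n : Int), n.toNat ≤ g → pvLoopA n ⟨1, le_refl 1⟩ = generate_n_samples_sequence_alt n := by
  induction g with
  | zero =>
    intro n hle
    rw [generate_n_samples_sequence_alt, pvLoopA_nil n 1 (le_refl 1) (by omega)]
    simp [show n < 1 by omega]
  | succ g ih =>
    intro n hle
    rw [pvLoopA_eq n 1, generate_n_samples_sequence_alt]
    by_cases h1 : (1 : Int) ≤ n
    · have hfd : PySem.Int.floordiv n 10 = n / 10 :=
        PySem.Int.floordiv_eq_ediv_of_pos (by omega)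
      have hscale := pvLoopA_scale (n + 1 - 1 * 10).toNat n 1 (le_refl 1) (le_refl _)
      have hrec : pvLoopA (n / 10) ⟨1, le_refl 1⟩ = generate_n_samples_sequence_alt (n / 10) :=
        ih (n / 10) (by omega)
      rw [hrec] at hscale
      rw [hfd, hscale]
      simp [h1, show ¬ n < 1 by omega, one_mul]
    · simp [h1, show n < 1 by omega]

-- ===== VERDICT (by name: the statement is the Claim_ definition above) =====
theorem generate_n_samples_sequence_spec : Claim_equal_generate_n_samples_sequence := by
  intro max_n _
  unfold Spec_generate_n_samples_sequence generate_n_samples_sequence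
  exact pvA_eq_alt max_n.toNat max_n (le_refl _)
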